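-- pv_equiv track=rewrite | github.com/bibleman-stan/readers-gnt | scripts/scan_r23_dative_infinitive.py | has_unprepped_dative
-- ===== SOURCE A (Python) =====
-- def is_dative_np(pos, p):
--     return pos in ("N-", "RP", "RD", "A-") and len(p) >= 5 and p[4] == "D"
--
-- def is_prep(pos, p):
--     return pos == "P-"
--
-- def has_unprepped_dative(tokens):
--     """Return a dative NP that is not immediately preceded by a preposition (within 2 positions)."""
--     for i, (w, pos, p, l) in enumerate(tokens):
--         if not is_dative_np(pos, p): continue
--         prep_near = False
--         for k in range(max(0, i-2), i):
--             if is_prep(tokens[k][1], tokens[k][2]):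
--                 prep_near = True; break
--         if not prep_near:
--             return (w, l)
--     return None
-- ===== SOURCE B (Python) =====
-- def has_unprepped_dative(tokens):
--     """Return a dative NP that is not immediately preceded by a preposition (within 2 positions)."""
--     last_prep = -10  # index of most recent preposition; sentinel far below -2
--     for i, (w, pos, p, l) in enumerate(tokens):
--         if pos in ("N-", "RP", "RD", "A-") and len(p) >= 5 and p[4] == "D":
--             if i - last_prep > 2:
--                 return (w, l)
--         elif pos == "P-":
--             last_prep = i
--     return None
-- ===== Notes on version B (the rewrite author's own statement) =====
-- stated objective: alternative
-- what changed: Replaces the inner backward window scan over tokens[max(0,i-2):i] with a single forward pass that maintains the index of the most recently seen preposition and compares i - last_prep > 2.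
import Mathlib
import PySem

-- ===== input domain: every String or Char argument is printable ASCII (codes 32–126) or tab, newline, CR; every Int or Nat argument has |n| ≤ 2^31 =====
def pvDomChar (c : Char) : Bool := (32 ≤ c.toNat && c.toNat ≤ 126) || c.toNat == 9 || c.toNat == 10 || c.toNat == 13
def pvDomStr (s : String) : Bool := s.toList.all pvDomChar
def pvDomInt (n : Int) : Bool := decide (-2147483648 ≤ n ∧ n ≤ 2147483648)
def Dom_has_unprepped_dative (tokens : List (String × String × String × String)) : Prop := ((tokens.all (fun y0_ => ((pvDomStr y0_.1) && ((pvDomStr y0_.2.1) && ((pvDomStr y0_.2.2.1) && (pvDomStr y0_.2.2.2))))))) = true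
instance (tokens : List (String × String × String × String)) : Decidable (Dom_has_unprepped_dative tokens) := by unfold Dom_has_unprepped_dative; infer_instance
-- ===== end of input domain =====

-- B replaces A's inner backward window scan with a single forward pass tracking the
-- index of the most recent preposition (alternative decomposition, same return value).

-- ===== PORT A =====
def is_dative_np (pos p : String) : Bool :=
  (pos == "N-" || pos == "RP" || pos == "RD" || pos == "A-")
    && decide (5 ≤ PySem.Str.len p)
    && (PySem.Str.pyGet? p 4 == some 'D')

def is_prep (pos _p : String) : Bool := pos == "P-"

-- token at index k (always in range in A's inner loop) tested for being a preposition
def prepAtI (tokens : List (String × String × String × String)) (k : Int) : Bool :=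
  match PySem.List.pyGet? tokens k with
  | some (_, pos, p, _) => is_prep pos p
  | none => false

-- A's inner loop: 'for k in range(max(0, i-2), i): if is_prep(...): prep_near = True; break'
def prepNearA (tokens : List (String × String × String × String)) (i : Int) : Bool :=
  (PySem.List.pyRange (max 0 (i - 2)) i 1).any (prepAtI tokens)

def aGo (tokens : List (String × String × String × String)) :
    List (Int × (String × String × String × String)) → Option (String × String)
  | [] => none
  | (i, (w, pos, p, l)) :: rest =>
    if !is_dative_np pos p then aGo tokens rest
    else if !prepNearA tokens i then some (w, l)
    else aGo tokens rest

def has_unprepped_dative (tokens : List (String × String × String × String)) :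
    Option (String × String) :=
  aGo tokens (PySem.List.enumerate tokens 0)

-- ===== PORT B =====
def bGo : List (String × String × String × String) → Int → Int → Option (String × String)
  | [], _, _ => none
  | (w, pos, p, l) :: rest, i, last_prep =>
    if is_dative_np pos p then
      if i - last_prep > 2 then some (w, l) else bGo rest (i + 1) last_prep
    else if pos == "P-" then bGo rest (i + 1) i
    else bGo rest (i + 1) last_prep

def has_unprepped_dative_alt (tokens : List (String × String × String × String)) :
    Option (String × String) :=
  bGo tokens 0 (-10)

-- ===== PRECONDITION & SPEC =====
def Spec_has_unprepped_dative (tokens : List (String × String × String × String)) (out : Option (String × String)) : Prop := out = has_unprepped_dative_alt tokens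
instance (tokens : List (String × String × String × String)) (out : Option (String × String)) : Decidable (Spec_has_unprepped_dative tokens out) := by unfold Spec_has_unprepped_dative; infer_instance

-- ===== CLAIM (what is proved, stated in full; the proofs are below) =====
def Claim_equal_has_unprepped_dative : Prop := ∀ (tokens : List (String × String × String × String)), Dom_has_unprepped_dative tokens → Spec_has_unprepped_dative tokens (has_unprepped_dative tokens)

-- ===== LEMMAS AND PROOFS =====

-- token at Nat index k is a preposition
def prepAt (tokens : List (String × String × String × String)) (k : Nat) : Bool :=
  match tokens[k]? with
  | some (_, pos, p, _) => is_prep pos p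
  | none => false

lemma prepAtI_nonneg (tokens : List (String × String × String × String)) (k : Int)
    (h : 0 ≤ k) : prepAtI tokens k = prepAt tokens k.toNat := by
  unfold prepAtI prepAt
  rw [PySem.List.pyGet?_of_nonneg _ h]

-- invariant: last_prep is the index of the most recent preposition before i (or -10 if none)
def PInv (tokens : List (String × String × String × String)) (i : Nat) (lp : Int) : Prop :=
  lp < (i : Int) ∧
    ((lp = -10 ∧ ∀ k : Nat, k < i → prepAt tokens k = false) ∨
     (0 ≤ lp ∧ prepAt tokens lp.toNat = true ∧
        ∀ k : Nat, lp < (k : Int) → k < i → prepAt tokens k = false))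

lemma prepNear_eq (tokens : List (String × String × String × String)) (i : Nat) (lp : Int)
    (hI : PInv tokens i lp) :
    prepNearA tokens (i : Int) = decide ((i : Int) - lp ≤ 2) := by
  obtain ⟨hlt, hcase⟩ := hI
  unfold prepNearA
  rcases hcase with ⟨hlp, hnone⟩ | ⟨hpos, hprep, hbetween⟩
  · have h2 : ¬ ((i : Int) - lp ≤ 2) := by omega
    simp only [h2, decide_false]
    rw [List.any_eq_false]
    intro x hx
    rw [PySem.List.mem_pyRange_one] at hx
    have hx0 : 0 ≤ x := le_trans (le_max_left 0 _) hx.1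
    rw [prepAtI_nonneg _ _ hx0]
    exact ne_true_of_eq_false (hnone x.toNat (by omega))
  · by_cases h2 : (i : Int) - lp ≤ 2
    · simp only [h2, decide_true]
      rw [List.any_eq_true]
      refine ⟨lp, ?_, ?_⟩
      · rw [PySem.List.mem_pyRange_one]
        constructor
        · exact max_le hpos (by omega)
        · exact hlt
      · rw [prepAtI_nonneg _ _ hpos]; exact hprep
    · simp only [h2, decide_false]
      rw [List.any_eq_false]
      intro x hx
      rw [PySem.List.mem_pyRange_one] at hx
      have hx0 : 0 ≤ x := le_trans (le_max_left 0 _) hx.1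
      have hge : (i : Int) - 2 ≤ x := le_trans (le_max_right 0 _) hx.1
      rw [prepAtI_nonneg _ _ hx0]
      exact ne_true_of_eq_false (hbetween x.toNat (by omega) (by omega))

lemma prepAt_append (pre rest : List (String × String × String × String))
    (t : String × String × String × String) :
    prepAt (pre ++ t :: rest) pre.length = is_prep t.2.1 t.2.2.1 := by
  unfold prepAt
  rw [List.getElem?_append_right (le_refl _)]
  simp

lemma inv_step_not_prep (tokens : List (String × String × String × String)) (i : Nat) (lp : Int)
    (hI : PInv tokens i lp) (h : prepAt tokens i = false) : PInv tokens (i + 1) lp := by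
  obtain ⟨hlt, hc⟩ := hI
  refine ⟨by omega, ?_⟩
  rcases hc with ⟨hlp, hnone⟩ | ⟨hpos, hprep, hbetween⟩
  · left
    refine ⟨hlp, fun k hk => ?_⟩
    rcases Nat.lt_or_ge k i with hk' | hk'
    · exact hnone k hk'
    · have : k = i := by omega
      subst this; exact h
  · right
    refine ⟨hpos, hprep, fun k hk1 hk2 => ?_⟩
    rcases Nat.lt_or_ge k i with hk' | hk'
    · exact hbetween k hk1 hk'
    · have : k = i := by omega
      subst this; exact h

lemma inv_step_prep (tokens : List (String × String × String × String)) (i : Nat)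
    (h : prepAt tokens i = true) : PInv tokens (i + 1) (i : Int) := by
  refine ⟨by omega, Or.inr ⟨by omega, ?_, fun k hk1 hk2 => absurd hk2 (by omega)⟩⟩
  simpa using h

lemma dative_not_prep (pos p : String) (h : is_dative_np pos p = true) :
    (pos == "P-") = false := by
  unfold is_dative_np at h
  simp only [Bool.and_eq_true, Bool.or_eq_true, beq_iff_eq] at h
  rcases h.1.1 with (((h' | h') | h') | h') <;> (subst h'; decide)

lemma main_lemma (tokens : List (String × String × String × String)) :
    ∀ (rest pre : List (String × String × String × String)) (lp : Int),
      tokens = pre ++ rest → PInv tokens pre.length lp →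
      aGo tokens (PySem.List.enumerate rest (pre.length : Int)) =
        bGo rest (pre.length : Int) lp := by
  intro rest
  induction rest with
  | nil => intro pre lp _ _; simp [PySem.List.enumerate_nil, aGo, bGo]
  | cons t rest ih =>
    intro pre lp heq hI
    obtain ⟨w, pos, p, l⟩ := t
    rw [PySem.List.enumerate_cons]
    show aGo tokens (((pre.length : Int), (w, pos, p, l)) :: _) = _
    have hAt : prepAt tokens pre.length = (pos == "P-") := by
      rw [heq]; exact prepAt_append pre rest (w, pos, p, l)
    have hpre' : tokens = (pre ++ [(w, pos, p, l)]) ++ rest := by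
      rw [heq]; simp
    have hlen : (pre ++ [(w, pos, p, l)]).length = pre.length + 1 := by simp
    by_cases hd : is_dative_np pos p = true
    · have hnp : (pos == "P-") = false := dative_not_prep pos p hd
      have hpn : prepNearA tokens (pre.length : Int) = decide ((pre.length : Int) - lp ≤ 2) :=
        prepNear_eq tokens pre.length lp hI
      by_cases hfar : (pre.length : Int) - lp > 2
      · -- A: prep_near false, returns (w,l); B: returns (w,l)
        have : prepNearA tokens (pre.length : Int) = false := by
          rw [hpn]; simp; omega
        simp [aGo, bGo, hd, this, hfar]
      · have : prepNearA tokens (pre.length : Int) = true := by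
          rw [hpn]; simp; omega
        simp only [aGo, bGo, hd, this, hfar, Bool.not_true, Bool.false_eq_true,
          if_false, if_true]
        have := ih (pre ++ [(w, pos, p, l)]) lp hpre'
          (by rw [hlen]; exact inv_step_not_prep tokens pre.length lp hI (by rw [hAt]; exact hnp))
        rw [hlen] at this
        push_cast at this ⊢
        exact this
    · simp only [aGo, bGo, hd, Bool.not_false, if_true, Bool.false_eq_true, if_false]
      by_cases hp : (pos == "P-") = true
      · simp only [hp, if_true]
        have := ih (pre ++ [(w, pos, p, l)]) (pre.length : Int) hpre'
          (by rw [hlen]; exact inv_step_prep tokens pre.length (by rw [hAt]; exact hp))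
        rw [hlen] at this
        push_cast at this ⊢
        exact this
      · have hp' : (pos == "P-") = false := Bool.of_not_eq_true hp
        simp only [hp', Bool.false_eq_true, if_false]
        have hstep : PInv tokens (pre ++ [(w, pos, p, l)]).length lp := by
          rw [hlen]
          exact inv_step_not_prep tokens pre.length lp hI (by rw [hAt]; exact hp')
        have := ih (pre ++ [(w, pos, p, l)]) lp hpre' hstep
        rw [hlen] at this
        push_cast at this ⊢
        exact this

-- ===== VERDICT (by name: the statement is the Claim_ definition above) =====
theorem has_unprepped_dative_spec : Claim_equal_has_unprepped_dative := by
  intro tokens _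
  unfold Spec_has_unprepped_dative has_unprepped_dative has_unprepped_dative_alt
  have := main_lemma tokens tokens [] (-10) (by simp)
    ⟨by simp, Or.inl ⟨rfl, fun k hk => absurd hk (Nat.not_lt_zero k)⟩⟩
  simpa using this
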